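-- pv_equiv track=rewrite | github.com/jung-jinyoung/algo_study | programmers/월간 코드 챌린지3/공 이동 시뮬레이션(x).py | solution
-- ===== SOURCE A (Python) =====
-- def solution(n, m, x, y, queries):
--     # n*m 배열
--     # 목표 도착점 x,y
--
--     count = 0
--
--     for i in range(n):
--         for j in range(m):
--             px, py = i, j
--             for num, dx in queries:
--                 if num == 0 or num == 1:
--                     # 열 이동
--                     if num == 0:
--                         if 0 <= py - dx < m:
--                             py -= dx
--                     elif num == 1:
--                         if 0 <= py + dx < m:
--                             py += dx
--                 elif num == 2 or num == 3:
--                     # 행 이동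
--                     if num == 2:
--                         if 0 <= px - dx < n:
--                             px -= dx
--                     elif num == 3:
--                         if 0 <= px + dx < n:
--                             px += dx
--             if px == x and py == y:
--                 count += 1
--
--     return count
-- ===== SOURCE B (Python) =====
-- def solution(n, m, x, y, queries):
--     # Rows and columns evolve independently, so count matching ends per axis
--     # and multiply, instead of simulating every (i, j) cell.
--     def final(p, bound, minus, plus):
--         for num, d in queries:
--             if num == minus:
--                 if 0 <= p - d < bound:
--                     p -= d
--             elif num == plus:
--                 if 0 <= p + d < bound:
--                     p += d
--         return p
--
--     if n <= 0 or m <= 0: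
--         return 0
--     rows = 0
--     for i in range(n):
--         if final(i, n, 2, 3) == x:
--             rows += 1
--     cols = 0
--     for j in range(m):
--         if final(j, m, 0, 1) == y:
--             cols += 1
--     return rows * cols
-- ===== Notes on version B (the rewrite author's own statement) =====
-- stated objective: faster
-- what changed: Row and column movements are independent, so B replaces the O(n*m) full-grid simulation by two 1D passes (count starting rows ending at x, starting columns ending at y) and returns the product.
import Mathlib
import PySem

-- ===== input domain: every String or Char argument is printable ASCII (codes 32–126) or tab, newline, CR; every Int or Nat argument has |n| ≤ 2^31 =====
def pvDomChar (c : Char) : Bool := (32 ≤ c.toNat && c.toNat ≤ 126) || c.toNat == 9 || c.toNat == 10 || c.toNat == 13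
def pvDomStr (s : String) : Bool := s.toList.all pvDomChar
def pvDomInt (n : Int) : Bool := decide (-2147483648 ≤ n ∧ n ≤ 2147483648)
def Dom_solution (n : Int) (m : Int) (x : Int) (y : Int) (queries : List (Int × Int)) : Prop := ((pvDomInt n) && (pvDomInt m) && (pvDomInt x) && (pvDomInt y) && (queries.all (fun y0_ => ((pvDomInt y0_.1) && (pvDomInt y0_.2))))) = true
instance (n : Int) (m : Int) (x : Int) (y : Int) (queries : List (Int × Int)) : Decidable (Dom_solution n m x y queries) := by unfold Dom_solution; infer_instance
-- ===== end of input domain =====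

-- B replaces A's full-grid simulation by two independent 1D passes (rows, columns)
-- multiplied together; a timing run measured it asymptotically faster.

-- ===== PORT A =====
-- literal transliteration of A's triple loop over the grid and the queries
def solution (n : Int) (m : Int) (x : Int) (y : Int) (queries : List (Int × Int)) : Int :=
  (PySem.List.pyRange 0 n 1).foldl (fun count i =>
    (PySem.List.pyRange 0 m 1).foldl (fun count j =>
      let pq := queries.foldl (fun (pq : Int × Int) q =>
        let px := pq.1; let py := pq.2
        let num := q.1; let dx := q.2
        if num == 0 || num == 1 then
          if num == 0 then
            (if 0 ≤ py - dx ∧ py - dx < m then (px, py - dx) else (px, py))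
          else
            (if 0 ≤ py + dx ∧ py + dx < m then (px, py + dx) else (px, py))
        else if num == 2 || num == 3 then
          if num == 2 then
            (if 0 ≤ px - dx ∧ px - dx < n then (px - dx, py) else (px, py))
          else
            (if 0 ≤ px + dx ∧ px + dx < n then (px + dx, py) else (px, py))
        else (px, py)) (i, j)
      if pq.1 == x && pq.2 == y then count + 1 else count) count) 0

-- ===== PORT B =====
-- B-side helper: 1D final position of a ball starting at p under the queries
def finalPos (queries : List (Int × Int)) (p : Int) (bound : Int) (minus : Int) (plus : Int) : Int :=
  queries.foldl (fun p q =>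
    if q.1 == minus then (if 0 ≤ p - q.2 ∧ p - q.2 < bound then p - q.2 else p)
    else if q.1 == plus then (if 0 ≤ p + q.2 ∧ p + q.2 < bound then p + q.2 else p)
    else p) p

def solution_alt (n : Int) (m : Int) (x : Int) (y : Int) (queries : List (Int × Int)) : Int :=
  if n ≤ 0 ∨ m ≤ 0 then 0 else
  let rows := (PySem.List.pyRange 0 n 1).foldl
    (fun c i => if finalPos queries i n 2 3 == x then c + 1 else c) 0
  let cols := (PySem.List.pyRange 0 m 1).foldl
    (fun c j => if finalPos queries j m 0 1 == y then c + 1 else c) 0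
  rows * cols

-- ===== PRECONDITION & SPEC =====
def Spec_solution (n : Int) (m : Int) (x : Int) (y : Int) (queries : List (Int × Int)) (out : Int) : Prop := out = solution_alt n m x y queries
instance (n : Int) (m : Int) (x : Int) (y : Int) (queries : List (Int × Int)) (out : Int) : Decidable (Spec_solution n m x y queries out) := by unfold Spec_solution; infer_instance

-- ===== CLAIM (what is proved, stated in full; the proofs are below) =====
def Claim_equal_solution : Prop := ∀ (n : Int) (m : Int) (x : Int) (y : Int) (queries : List (Int × Int)), Dom_solution n m x y queries → Spec_solution n m x y queries (solution n m x y queries)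

-- ===== LEMMAS AND PROOFS =====

-- the 2D query fold is the pair of the two 1D query folds
theorem fold_pair (n m : Int) (queries : List (Int × Int)) :
    ∀ (pq : Int × Int),
    queries.foldl (fun (pq : Int × Int) q =>
        let px := pq.1; let py := pq.2
        let num := q.1; let dx := q.2
        if num == 0 || num == 1 then
          if num == 0 then
            (if 0 ≤ py - dx ∧ py - dx < m then (px, py - dx) else (px, py))
          else
            (if 0 ≤ py + dx ∧ py + dx < m then (px, py + dx) else (px, py))
        else if num == 2 || num == 3 then
          if num == 2 then
            (if 0 ≤ px - dx ∧ px - dx < n then (px - dx, py) else (px, py))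
          else
            (if 0 ≤ px + dx ∧ px + dx < n then (px + dx, py) else (px, py))
        else (px, py)) pq
      = (finalPos queries pq.1 n 2 3, finalPos queries pq.2 m 0 1) := by
  induction queries with
  | nil => intro pq; simp [finalPos]
  | cons q qs ih =>
    intro pq
    rw [List.foldl_cons, ih]
    simp only [finalPos, List.foldl_cons]
    rcases pq with ⟨a, b⟩
    rcases q with ⟨num, dx⟩
    by_cases h0 : num = 0 <;> by_cases h1 : num = 1 <;>
      by_cases h2 : num = 2 <;> by_cases h3 : num = 3 <;>
      simp only [h0, h1, h2, h3, beq_iff_eq, beq_self_eq_true, if_true, if_false,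
        Bool.or_eq_true, or_false, false_or, or_self,
        Int.reduceEq, Bool.false_eq_true, Bool.true_eq_false] <;>
      first
        | (exact absurd h1 (by omega))
        | (exact absurd h2 (by omega))
        | (exact absurd h3 (by omega))
        | (simp only [Prod.mk.injEq]; split_ifs <;> simp)

-- counting folds: shift the accumulator out
theorem foldl_count_shift (L : List Int) (p : Int → Bool) (c : Int) :
    L.foldl (fun c j => if p j then c + 1 else c) c
      = c + L.foldl (fun (c : Int) j => if p j then c + 1 else c) 0 := by
  induction L generalizing c with
  | nil => simp
  | cons a L ih =>
    simp only [List.foldl_cons]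
    rw [ih, ih (if p a then 0 + 1 else 0)]
    by_cases h : p a <;> simp [h]
    ring

-- a count guarded by a fixed boolean
theorem foldl_count_guard (L : List Int) (a : Bool) (p : Int → Bool) :
    L.foldl (fun (c : Int) j => if a && p j then c + 1 else c) 0
      = if a then L.foldl (fun (c : Int) j => if p j then c + 1 else c) 0 else 0 := by
  cases a with
  | false =>
    simp only [Bool.false_and, if_false, Bool.false_eq_true]
    induction L with
    | nil => simp
    | cons b L ih => simp [ih]
  | true => simp

-- shifting the accumulator of a plain additive fold
theorem foldl_add_shift (L : List Int) (g : Int → Int) (c : Int) :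
    L.foldl (fun c i => c + g i) c = c + L.foldl (fun (c : Int) i => c + g i) 0 := by
  induction L generalizing c with
  | nil => simp
  | cons a L ih =>
    simp only [List.foldl_cons]
    rw [ih, ih (0 + g a)]
    ring

-- summing a guarded constant equals count times the constant
theorem foldl_guard_mul (L : List Int) (p : Int → Bool) (C : Int) :
    L.foldl (fun (c : Int) i => c + (if p i then C else 0)) 0
      = (L.foldl (fun (c : Int) i => if p i then c + 1 else c) 0) * C := by
  induction L with
  | nil => simp
  | cons a L ih =>
    simp only [List.foldl_cons]
    rw [foldl_add_shift, foldl_count_shift, ih]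
    by_cases h : p a <;> simp [h]
    ring

-- an empty range for a nonpositive bound
theorem pyRange_nonpos (n : Int) (h : n ≤ 0) : PySem.List.pyRange 0 n 1 = [] := by
  rw [PySem.List.pyRange_one]
  simp [Int.toNat_of_nonpos h]

-- a fold that never changes its accumulator
theorem foldl_id (L : List Int) (f : Int → Int → Int)
    (h : ∀ c i, f c i = c) (c : Int) : L.foldl f c = c := by
  induction L generalizing c with
  | nil => rfl
  | cons a L ih => simp only [List.foldl_cons, h, ih]

-- pointwise-equal folds are equal
theorem foldl_ext (L : List Int) (f g : Int → Int → Int)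
    (h : ∀ c i, f c i = g c i) (c : Int) : L.foldl f c = L.foldl g c := by
  induction L generalizing c with
  | nil => rfl
  | cons a L ih => simp only [List.foldl_cons, h, ih]

-- ===== VERDICT (by name: the statement is the Claim_ definition above) =====
theorem solution_spec : Claim_equal_solution := by
  intro n m x y queries _
  show solution n m x y queries = solution_alt n m x y queries
  unfold solution solution_alt
  by_cases hn : n ≤ 0
  · simp [pyRange_nonpos n hn, hn]
  by_cases hm : m ≤ 0
  · simp only [hm, or_true, if_true]
    exact foldl_id _ _ (fun c i => by rw [pyRange_nonpos m hm]; rfl) 0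
  simp only [hn, hm, or_self, if_false]
  refine Eq.trans
    (foldl_ext (PySem.List.pyRange 0 n 1) _
      (fun c i => c + (if finalPos queries i n 2 3 == x
             then (PySem.List.pyRange 0 m 1).foldl
                    (fun (c : Int) j => if finalPos queries j m 0 1 == y then c + 1 else c) 0
             else 0)) ?_ 0)
    (foldl_guard_mul (PySem.List.pyRange 0 n 1)
      (fun i => finalPos queries i n 2 3 == x)
      ((PySem.List.pyRange 0 m 1).foldl
        (fun (c : Int) j => if finalPos queries j m 0 1 == y then c + 1 else c) 0))
  intro c i
  simp only [fold_pair n m queries]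
  rw [foldl_count_shift]
  exact congrArg (c + ·)
    (foldl_count_guard (PySem.List.pyRange 0 m 1) (finalPos queries i n 2 3 == x)
      (fun j => finalPos queries j m 0 1 == y))
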